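-- pv_equiv track=rewrite | github.com/catrionafsmith/coding_challenges | python/6kyu/202319_break_camel_case.py | solution
-- ===== SOURCE A (Python) =====
-- import string
--
-- def solution(s):
--     new_str = ""
--     for char in s:
--         if char in string.ascii_uppercase:
--             new_str += " " + char
--         else:
--             new_str += char
--     return new_str
-- ===== SOURCE B (Python) =====
-- import re
--
-- def solution(s):
--     return re.sub(r'([A-Z])', r' \1', s)
-- ===== Notes on version B (the rewrite author's own statement) =====
-- stated objective: faster
-- what changed: Replaced the per-character loop with repeated string concatenation and an ascii_uppercase membership test by a single regex substitution that inserts a space before every ASCII uppercase letter in one engine-driven pass.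
import Mathlib
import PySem

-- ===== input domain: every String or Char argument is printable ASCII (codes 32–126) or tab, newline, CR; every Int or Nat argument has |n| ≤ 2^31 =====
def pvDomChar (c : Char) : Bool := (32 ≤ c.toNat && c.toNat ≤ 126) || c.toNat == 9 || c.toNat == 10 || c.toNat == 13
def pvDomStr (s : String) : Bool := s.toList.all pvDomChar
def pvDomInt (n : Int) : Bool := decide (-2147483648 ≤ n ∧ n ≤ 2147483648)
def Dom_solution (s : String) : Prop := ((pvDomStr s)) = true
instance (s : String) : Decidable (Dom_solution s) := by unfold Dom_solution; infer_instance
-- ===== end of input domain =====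

-- B replaces A's per-character loop (membership test + string concatenation) by a single
-- regex substitution re.sub(r'([A-Z])', r' \1', s); same return value, idiomatic one-liner.

-- ===== PORT A =====
-- string.ascii_uppercase as a list of characters
def asciiUppercase : List Char := ['A', 'B', 'C', 'D', 'E', 'F', 'G', 'H', 'I', 'J', 'K', 'L', 'M', 'N', 'O', 'P', 'Q', 'R', 'S', 'T', 'U', 'V', 'W', 'X', 'Y', 'Z']

-- loop over s, appending " "+char for uppercase chars, char otherwise
def solution (s : String) : String :=
  String.ofList (s.toList.foldl
    (fun acc c => acc ++ (if PySem.Chars.isIn [c] asciiUppercase then [' ', c] else [c])) [])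

-- ===== PORT B =====
-- re.sub(r'([A-Z])', r' \1', s): the engine replaces each match (a single char in [A-Z])
-- by ' '+itself and copies everything else through — i.e. a flatMap over the characters.
def solution_alt (s : String) : String :=
  String.ofList (s.toList.flatMap (fun c => if 'A' ≤ c ∧ c ≤ 'Z' then [' ', c] else [c]))

-- ===== PRECONDITION & SPEC =====
def Spec_solution (s : String) (out : String) : Prop := out = solution_alt s
instance (s : String) (out : String) : Decidable (Spec_solution s out) := by unfold Spec_solution; infer_instance

-- ===== CLAIM (what is proved, stated in full; the proofs are below) =====
def Claim_equal_solution : Prop := ∀ (s : String), Dom_solution s → Spec_solution s (solution s)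

-- ===== LEMMAS AND PROOFS =====

-- `char in string.ascii_uppercase` is exactly the range test [A-Z]
theorem isIn_up (c : Char) :
    PySem.Chars.isIn [c] asciiUppercase = decide ('A' ≤ c ∧ c ≤ 'Z') := by
  rcases Bool.eq_false_or_eq_true (PySem.Chars.isIn [c] asciiUppercase) with h | h <;> rw [h]
  · have h2 := (PySem.Chars.isIn_iff_infix _ _).mp h
    rw [List.singleton_infix_iff] at h2
    symm; simp only [decide_eq_true_iff]
    fin_cases h2 <;> exact ⟨by decide, by decide⟩
  · have h2 := (PySem.Chars.isIn_eq_false_iff _ _).mp h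
    rw [List.singleton_infix_iff] at h2
    symm; simp only [decide_eq_false_iff_not]
    intro ⟨h3, h4⟩
    apply h2
    have hb1 : 65 ≤ c.toNat := UInt32.le_iff_toNat_le.mp h3
    have hb2 : c.toNat ≤ 90 := UInt32.le_iff_toNat_le.mp h4
    have key : ∀ d : Char, (c = d) = (c.toNat = d.toNat) := by
      intro d
      exact propext ⟨fun h => by rw [h], fun hd => Char.ext (UInt32.toNat_inj.mp hd)⟩
    simp only [asciiUppercase, List.mem_cons, List.not_mem_nil, or_false, key,
      show ('A').toNat = 65 from rfl, show ('B').toNat = 66 from rfl, show ('C').toNat = 67 from rfl, show ('D').toNat = 68 from rfl, show ('E').toNat = 69 from rfl, show ('F').toNat = 70 from rfl, show ('G').toNat = 71 from rfl, show ('H').toNat = 72 from rfl, show ('I').toNat = 73 from rfl, show ('J').toNat = 74 from rfl, show ('K').toNat = 75 from rfl, show ('L').toNat = 76 from rfl, show ('M').toNat = 77 from rfl, show ('N').toNat = 78 from rfl, show ('O').toNat = 79 from rfl, show ('P').toNat = 80 from rfl, show ('Q').toNat = 81 from rfl, show ('R').toNat = 82 from rfl, show ('S').toNat = 83 from rfl,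 show ('T').toNat = 84 from rfl, show ('U').toNat = 85 from rfl, show ('V').toNat = 86 from rfl, show ('W').toNat = 87 from rfl, show ('X').toNat = 88 from rfl, show ('Y').toNat = 89 from rfl, show ('Z').toNat = 90 from rfl]
    omega

theorem solution_eq_alt (s : String) : solution s = solution_alt s := by
  unfold solution solution_alt
  rw [PySem.List.foldl_append_eq_flatMap]
  simp only [List.nil_append]
  congr 1
  apply List.flatMap_congr
  intro c _
  rw [isIn_up]
  by_cases h : 'A' ≤ c ∧ c ≤ 'Z' <;> simp [h]

-- ===== VERDICT (by name: the statement is the Claim_ definition above) =====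
theorem solution_spec : Claim_equal_solution := by
  intro s _
  unfold Spec_solution
  exact solution_eq_alt s
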